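-- pv_equiv track=rewrite | github.com/a-fleming/static-site-generator | src/block_markdown.py | is_heading_block
-- ===== SOURCE A (Python) =====
-- def is_heading_block(block_list: list) -> bool:
--     if len(block_list) != 1:
--         return False
--     words = block_list[0].split(" ")
--     if len(words) < 2:
--         return False
--     lead_chars = words[0]
--     if len(lead_chars) < 1 or len(lead_chars) > 6:
--         return False
--
--     for i in range(len(lead_chars)):
--         if lead_chars[i] != "#":
--             return False
--     return True
-- ===== SOURCE B (Python) =====
-- import re
--
-- def is_heading_block(block_list: list) -> bool:
--     if len(block_list) != 1:
--         return False
--     return bool(re.match(r"#{1,6} ", block_list[0]))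
-- ===== Notes on version B (the rewrite author's own statement) =====
-- stated objective: idiomatic
-- what changed: Replaced the split-on-space / word-length / per-character loop with a single anchored regex match r'#{1,6} ' (1-6 '#' followed by a space).
import Mathlib
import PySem

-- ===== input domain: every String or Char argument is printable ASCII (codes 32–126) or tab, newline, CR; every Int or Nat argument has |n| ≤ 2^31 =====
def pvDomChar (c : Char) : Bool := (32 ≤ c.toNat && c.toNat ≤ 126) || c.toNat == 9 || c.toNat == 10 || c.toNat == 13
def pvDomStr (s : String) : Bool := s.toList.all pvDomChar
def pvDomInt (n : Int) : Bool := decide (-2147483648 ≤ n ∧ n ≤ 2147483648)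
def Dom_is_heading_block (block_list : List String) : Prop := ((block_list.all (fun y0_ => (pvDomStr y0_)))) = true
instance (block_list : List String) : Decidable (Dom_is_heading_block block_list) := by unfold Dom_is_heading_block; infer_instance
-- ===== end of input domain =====

-- B replaces A's split-on-space / word-length / per-character loop by a single anchored
-- regex match r"#{1,6} " (idiomatic; same cost).

-- ===== PORT A =====
-- the for-loop over lead_chars with its early `return False`
def headingLoopA : List Char → Bool
  | [] => true
  | c :: rest => if c ≠ '#' then false else headingLoopA rest

def is_heading_block (block_list : List String) : Bool :=
  match block_list with
  | [s] =>
    let words := PySem.Chars.splitOn s.toList [' ']    -- block_list[0].split(" ")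
    if words.length < 2 then false
    else
      let lead_chars := words.headI                    -- words[0] (words is nonempty here)
      if lead_chars.length < 1 ∨ lead_chars.length > 6 then false
      else headingLoopA lead_chars
  | _ => false                                         -- len(block_list) != 1

-- ===== PORT B =====
-- re.match(r"#{1,6} ", s) ported by hand: the anchored regex is the alternation
-- '# '|'## '|…|'###### ', i.e. some k ∈ 1..6 with k leading '#' followed by a space.
def is_heading_block_alt (block_list : List String) : Bool :=
  if block_list.length ≠ 1 then false
  else
    let cs := block_list.headI.toList    -- block_list[0] (the list has exactly one element here)
    (List.range 6).any (fun j =>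
      decide (cs.take (j+1) = List.replicate (j+1) '#') && (cs[j+1]? == some ' '))

-- ===== PRECONDITION & SPEC =====
def Spec_is_heading_block (block_list : List String) (out : Bool) : Prop := out = is_heading_block_alt block_list
instance (block_list : List String) (out : Bool) : Decidable (Spec_is_heading_block block_list out) := by unfold Spec_is_heading_block; infer_instance

-- ===== CLAIM (what is proved, stated in full; the proofs are below) =====
def Claim_equal_is_heading_block : Prop := ∀ (block_list : List String), Dom_is_heading_block block_list → Spec_is_heading_block block_list (is_heading_block block_list)

-- ===== LEMMAS AND PROOFS =====

lemma headingLoopA_eq_all (l : List Char) : headingLoopA l = l.all (· == '#') := by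
  induction l with
  | nil => rfl
  | cons c rest ih =>
    by_cases h : c = '#' <;> simp [headingLoopA, h, ih]

-- structure of splitOn.go for the one-character separator [' ']
lemma splitOn_go_space : ∀ (fuel : Nat) (l cur : List Char) (acc : List (List Char)),
    l.length < fuel →
    ∃ ws, PySem.Chars.splitOn.go [' '] fuel l cur acc
          = acc.reverse ++ ((cur.reverse ++ l.takeWhile (fun c => c ≠ ' ')) :: ws)
        ∧ (ws = [] ↔ ' ' ∉ l) := by
  intro fuel
  induction fuel with
  | zero => intro l cur acc h; omega
  | succ n ih =>
    intro l cur acc h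
    match l with
    | [] =>
      refine ⟨[], ?_, by simp⟩
      rw [PySem.Chars.splitOn.go] <;> simp
    | c :: rest =>
      rw [PySem.Chars.splitOn.go]
      by_cases hc : c = ' '
      · subst hc
        have hpre : ([' '].isPrefixOf (' '::rest)) = true := by simp [List.isPrefixOf]
        rw [hpre]
        obtain ⟨ws', hws', hemp'⟩ := ih rest [] (cur.reverse :: acc) (by simp at h; omega)
        exact ⟨rest.takeWhile (fun c => c ≠ ' ') :: ws', by simp [hws'], by simp⟩
      · have hpre : ([' '].isPrefixOf (c::rest)) = false := by
          simp [List.isPrefixOf]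
          exact fun hh => hc hh.symm
        rw [hpre]
        obtain ⟨ws', hws', hemp'⟩ := ih rest (c :: cur) acc (by simp at h; omega)
        refine ⟨ws', ?_, ?_⟩
        · simp [hws', hc]
        · rw [hemp']
          simp [List.mem_cons, Ne.symm hc]

lemma splitOn_space (cs : List Char) :
    ∃ ws, PySem.Chars.splitOn cs [' '] = (cs.takeWhile (fun c => c ≠ ' ')) :: ws
        ∧ (ws = [] ↔ ' ' ∉ cs) := by
  have := splitOn_go_space (cs.length + 1) cs [] [] (by omega)
  simpa [PySem.Chars.splitOn] using this

-- ' ' ∈ cs → the character right after the first word is a space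
lemma getElem_len_takeWhile (cs : List Char) (h : ' ' ∈ cs) :
    cs[(cs.takeWhile (fun c => c ≠ ' ')).length]? = some ' ' := by
  induction cs with
  | nil => simp at h
  | cons c rest ih =>
    by_cases hc : c = ' '
    · subst hc; simp
    · have hr : ' ' ∈ rest := by
        rcases List.mem_cons.1 h with h1 | h1
        · exact absurd h1.symm hc
        · exact h1
      simpa [List.takeWhile_cons, hc] using ih hr

-- k leading '#' followed by a space pins down the first word
lemma takeWhile_of_hashes : ∀ (k : Nat) (cs : List Char),
    cs.take k = List.replicate k '#' → cs[k]? = some ' ' →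
    cs.takeWhile (fun c => c ≠ ' ') = cs.take k := by
  intro k
  induction k with
  | zero =>
    intro cs _ hg
    match cs with
    | [] => simp at hg
    | c :: rest =>
      have : c = ' ' := by simpa using hg
      simp [this]
  | succ n ih =>
    intro cs ht hg
    match cs with
    | [] => simp at hg
    | c :: rest =>
      have hc : c = '#' ∧ rest.take n = List.replicate n '#' := by
        simpa [List.replicate_succ] using ht
      have hg' : rest[n]? = some ' ' := by simpa using hg
      have hres := ih rest hc.2 hg'
      simp only [ne_eq, decide_not] at hres
      simp [hc.1, hres]

lemma A_iff (s : String) : is_heading_block [s] = true ↔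
    (' ' ∈ s.toList
      ∧ 1 ≤ (s.toList.takeWhile (fun c => c ≠ ' ')).length
      ∧ (s.toList.takeWhile (fun c => c ≠ ' ')).length ≤ 6
      ∧ ∀ c ∈ s.toList.takeWhile (fun c => c ≠ ' '), c = '#') := by
  obtain ⟨ws, hws, hemp⟩ := splitOn_space s.toList
  simp only [is_heading_block, hws, List.headI_cons, List.length_cons]
  by_cases hn : ws = []
  · subst hn
    have hmem : ' ' ∉ s.toList := hemp.1 rfl
    simp [hmem]
  · have hmem : ' ' ∈ s.toList := by
      by_contra hx; exact hn (hemp.2 hx)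
    rw [if_neg (by have := List.length_pos_iff.2 hn; omega : ¬ (ws.length + 1 < 2))]
    by_cases hb : ((s.toList.takeWhile (fun c => c ≠ ' ')).length < 1
                    ∨ (s.toList.takeWhile (fun c => c ≠ ' ')).length > 6)
    · rw [if_pos hb]
      simp only [Bool.false_eq_true, false_iff]
      rintro ⟨-, h1, h6, -⟩
      omega
    · rw [if_neg hb, headingLoopA_eq_all]
      simp only [List.all_eq_true, beq_iff_eq]
      constructor
      · intro hall
        exact ⟨hmem, by omega, by omega, hall⟩
      · rintro ⟨-, -, -, hall⟩
        exact hall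

lemma B_iff (s : String) : is_heading_block_alt [s] = true ↔
    ∃ k, 1 ≤ k ∧ k ≤ 6 ∧ s.toList.take k = List.replicate k '#' ∧ s.toList[k]? = some ' ' := by
  simp only [is_heading_block_alt, List.headI_cons]
  rw [if_neg (by simp : ¬ (([s] : List String).length ≠ 1))]
  simp only [List.any_eq_true, List.mem_range, Bool.and_eq_true, decide_eq_true_eq, beq_iff_eq]
  constructor
  · rintro ⟨j, hj, h1, h2⟩
    exact ⟨j + 1, by omega, by omega, h1, h2⟩
  · rintro ⟨k, hk1, hk6, h1, h2⟩
    refine ⟨k - 1, by omega, ?_⟩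
    have hk : k - 1 + 1 = k := by omega
    rw [hk]
    exact ⟨h1, h2⟩

lemma key (s : String) : is_heading_block [s] = is_heading_block_alt [s] := by
  rw [Bool.eq_iff_iff, A_iff, B_iff]
  constructor
  · rintro ⟨hmem, h1, h6, hall⟩
    refine ⟨(s.toList.takeWhile (fun c => c ≠ ' ')).length, h1, h6, ?_,
      getElem_len_takeWhile _ hmem⟩
    have hp : s.toList.takeWhile (fun c => c ≠ ' ') <+: s.toList := List.takeWhile_prefix _
    rw [← List.prefix_iff_eq_take.1 hp]
    exact List.eq_replicate_iff.2 ⟨rfl, hall⟩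
  · rintro ⟨k, hk1, hk6, htake, hget⟩
    obtain ⟨hlt, heq⟩ := List.getElem?_eq_some_iff.1 hget
    have htw := takeWhile_of_hashes k s.toList htake hget
    have hlen : (s.toList.take k).length = k := by
      have h' : k ≤ s.toList.length := Nat.le_of_lt hlt
      simp only [List.length_take]
      omega
    refine ⟨heq ▸ List.getElem_mem hlt, ?_, ?_, ?_⟩
    · rw [htw, hlen]; exact hk1
    · rw [htw, hlen]; exact hk6
    · intro c hc
      rw [htw, htake] at hc
      exact List.eq_of_mem_replicate hc

-- ===== VERDICT (by name: the statement is the Claim_ definition above) =====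
theorem is_heading_block_spec : Claim_equal_is_heading_block := by
  intro bl _
  unfold Spec_is_heading_block
  match bl with
  | [] => rfl
  | [s] => exact key s
  | x :: y :: t => simp [is_heading_block, is_heading_block_alt]
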